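-- pv_equiv track=rewrite | github.com/Vaishnavi994/AI-Powered-Code-Reviewer-and-Quality-Assistant- | code_analyzer.py | detect_consecutive_blank_lines
-- ===== SOURCE A (Python) =====
-- def detect_consecutive_blank_lines(source, file_name):
--     lines = source.split("\n")
--     errors = []
--     blank_count = 0
--
--     for i, line in enumerate(lines):
--         if line.strip() == "":
--             blank_count += 1
--             if blank_count == 3:
--                 errors.append(f"{file_name}: Too many consecutive blank lines near line {i+1}")
--         else:
--             blank_count = 0
--
--     return errors
-- ===== SOURCE B (Python) =====
-- def detect_consecutive_blank_lines(source, file_name):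
--     # run-based scan: find each maximal run of blank lines, emit one error
--     # per run of length >= 3 at the third blank line of the run
--     lines = source.split("\n")
--     errors = []
--     i, n = 0, len(lines)
--     while i < n:
--         if lines[i].strip() == "":
--             j = i
--             while j < n and lines[j].strip() == "":
--                 j += 1
--             if j - i >= 3:
--                 errors.append(f"{file_name}: Too many consecutive blank lines near line {i + 3}")
--             i = j
--         else:
--             i += 1
--     return errors
-- ===== Notes on version B (the rewrite author's own statement) =====
-- stated objective: alternative
-- what changed: Replaces the per-line blank counter (emit when the counter hits 3) with a two-pointer scan over maximal runs of blank lines, emitting one error per run of length >= 3 at its third line.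
import Mathlib
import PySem

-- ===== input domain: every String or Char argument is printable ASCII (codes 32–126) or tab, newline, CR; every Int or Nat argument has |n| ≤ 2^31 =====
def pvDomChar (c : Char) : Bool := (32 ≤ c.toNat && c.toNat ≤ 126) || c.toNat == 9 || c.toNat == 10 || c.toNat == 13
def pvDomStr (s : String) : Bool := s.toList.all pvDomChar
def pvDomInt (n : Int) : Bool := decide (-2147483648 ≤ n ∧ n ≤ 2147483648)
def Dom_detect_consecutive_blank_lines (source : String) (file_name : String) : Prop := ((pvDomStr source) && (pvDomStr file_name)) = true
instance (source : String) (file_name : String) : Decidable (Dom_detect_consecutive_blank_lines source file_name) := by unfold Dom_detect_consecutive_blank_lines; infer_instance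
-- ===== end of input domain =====

-- B replaces A's per-line blank counter with a two-pointer scan over maximal blank runs (alternative decomposition, same cost).

-- the error message for line number k (shared text of both ports)
def pvMsg (file_name : String) (k : Int) : String :=
  file_name ++ ": Too many consecutive blank lines near line " ++ PySem.Int.toStr k

-- source.split("\n"): the separator is the fixed non-empty "\n", so split? is always `some`
def pvLines (source : String) : List String :=
  (PySem.Str.split? source "\n").getD []

-- ===== PORT A =====
def detect_consecutive_blank_lines (source : String) (file_name : String) : List String :=
  let lines := pvLines source
  ((PySem.List.enumerate lines).foldl
    (fun (st : List String × Int) (p : Int × String) =>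
      if PySem.Str.strip p.2 = "" then
        let bc := st.2 + 1
        (if bc = 3 then st.1 ++ [pvMsg file_name (p.1 + 1)] else st.1, bc)
      else (st.1, 0))
    ([], 0)).1

-- ===== PORT B =====
-- outer while loop of Source B: i is the 0-based index of the head of `lines`;
-- the inner while loop (advancing j over the blank run) is takeWhile/dropWhile
def pvGoB (file_name : String) (lines : List String) (i : Int) : List String :=
  match lines with
  | [] => []
  | l :: rest =>
    if PySem.Str.strip l = "" then
      let run := (l :: rest).takeWhile (fun s => PySem.Str.strip s == "")
      let rest' := (l :: rest).dropWhile (fun s => PySem.Str.strip s == "")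
      (if 3 ≤ run.length then [pvMsg file_name (i + 3)] else [])
        ++ pvGoB file_name rest' (i + run.length)
    else pvGoB file_name rest (i + 1)
termination_by lines.length
decreasing_by
  · simp only [List.dropWhile_cons, beq_iff_eq, if_pos ‹_›, List.length_cons]
    exact Nat.lt_succ_of_le (List.length_dropWhile_le _ _)
  · simp

def detect_consecutive_blank_lines_alt (source : String) (file_name : String) : List String :=
  pvGoB file_name (pvLines source) 0

-- ===== PRECONDITION & SPEC =====
def Spec_detect_consecutive_blank_lines (source : String) (file_name : String) (out : List String) : Prop := out = detect_consecutive_blank_lines_alt source file_name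
instance (source : String) (file_name : String) (out : List String) : Decidable (Spec_detect_consecutive_blank_lines source file_name out) := by unfold Spec_detect_consecutive_blank_lines; infer_instance

-- ===== CLAIM (what is proved, stated in full; the proofs are below) =====
def Claim_equal_detect_consecutive_blank_lines : Prop := ∀ (source : String) (file_name : String), Dom_detect_consecutive_blank_lines source file_name → Spec_detect_consecutive_blank_lines source file_name (detect_consecutive_blank_lines source file_name)

-- ===== LEMMAS AND PROOFS =====

-- A's loop, as a message-emitting recursion: i = enumerate index of head, c = blank_count
def pvGoA (fn : String) : List String → Int → Int → List String
  | [], _, _ => []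
  | l :: rest, i, c =>
    if PySem.Str.strip l = "" then
      (if c + 1 = 3 then [pvMsg fn (i + 1)] else []) ++ pvGoA fn rest (i + 1) (c + 1)
    else pvGoA fn rest (i + 1) 0

-- A's final counter
def pvCntA : List String → Int → Int
  | [], c => c
  | l :: rest, c => if PySem.Str.strip l = "" then pvCntA rest (c + 1) else pvCntA rest 0

lemma foldA_eq_goA (fn : String) (lines : List String) :
    ∀ (errs : List String) (i c : Int),
    (PySem.List.enumerate lines i).foldl
      (fun (st : List String × Int) (p : Int × String) =>
        if PySem.Str.strip p.2 = "" then
          let bc := st.2 + 1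
          (if bc = 3 then st.1 ++ [pvMsg fn (p.1 + 1)] else st.1, bc)
        else (st.1, 0))
      (errs, c)
    = (errs ++ pvGoA fn lines i c, pvCntA lines c) := by
  induction lines with
  | nil => intro errs i c; simp [PySem.List.enumerate_nil, pvGoA, pvCntA]
  | cons l rest ih =>
    intro errs i c
    simp only [PySem.List.enumerate_cons, List.foldl_cons]
    by_cases h : PySem.Str.strip l = ""
    · by_cases h3 : c + 1 = 3 <;>
        simp [h, h3, pvGoA, pvCntA, ih]
    · simp [h, pvGoA, pvCntA, ih]

-- one maximal blank run: A emits exactly when the counter crosses 3 inside it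
lemma goA_run (fn : String) (run : List String) :
    ∀ (rest : List String) (i c : Int), (∀ l ∈ run, PySem.Str.strip l = "") →
    pvGoA fn (run ++ rest) i c
      = (if c < 3 ∧ 3 ≤ c + run.length then [pvMsg fn (i + (3 - c))] else [])
        ++ pvGoA fn rest (i + run.length) (c + run.length) := by
  induction run with
  | nil =>
    intro rest i c _
    have hf : ¬ (c < 3 ∧ 3 ≤ c + (([] : List String).length : Int)) := by
      rintro ⟨h1, h2⟩
      simp only [List.length_nil, Nat.cast_zero, add_zero] at h2
      omega
    rw [if_neg hf]
    simp
  | cons l run ih =>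
    intro rest i c hall
    have hl : PySem.Str.strip l = "" := hall l (by simp)
    have hrun : ∀ x ∈ run, PySem.Str.strip x = "" := fun x hx => hall x (by simp [hx])
    have hlen : (((l :: run).length : Int)) = (run.length : Int) + 1 := by
      simp [List.length_cons]
    rw [List.cons_append]
    simp only [pvGoA, if_pos hl]
    rw [ih rest (i + 1) (c + 1) hrun, hlen]
    by_cases h3 : c + 1 = 3
    · have hc : c = 2 := by omega
      subst hc
      rw [if_pos h3,
          if_neg (show ¬ ((2:Int) + 1 < 3 ∧ 3 ≤ 2 + 1 + (run.length : Int)) by omega),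
          if_pos (show (2:Int) < 3 ∧ 3 ≤ 2 + ((run.length : Int) + 1) by omega)]
      have e1 : i + (3 - (2:Int)) = i + 1 := by ring
      have e2 : i + 1 + (run.length : Int) = i + ((run.length : Int) + 1) := by ring
      have e3 : (2:Int) + 1 + (run.length : Int) = 2 + ((run.length : Int) + 1) := by ring
      rw [e1, e2, e3]
      simp
    · rw [if_neg h3, List.nil_append,
          if_congr (show (c + 1 < 3 ∧ 3 ≤ c + 1 + (run.length : Int))
              ↔ (c < 3 ∧ 3 ≤ c + ((run.length : Int) + 1)) by omega) rfl rfl]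
      have e1 : i + 1 + (3 - (c + 1)) = i + (3 - c) := by ring
      have e2 : i + 1 + (run.length : Int) = i + ((run.length : Int) + 1) := by ring
      have e3 : c + 1 + (run.length : Int) = c + ((run.length : Int) + 1) := by ring
      rw [e1, e2, e3]

-- the head of a dropWhile result fails the predicate
lemma pvDropWhile_head_false {α : Type} (p : α → Bool) (l : List α) (x : α) (t : List α)
    (h : l.dropWhile p = x :: t) : p x = false := by
  induction l with
  | nil => simp at h
  | cons a l ih =>
    by_cases hp : p a
    · rw [List.dropWhile_cons_of_pos hp] at h; exact ih h
    · rw [List.dropWhile_cons_of_neg hp] at h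
      cases h; simpa using hp

-- the counter is irrelevant when the list ends or its head is non-blank
lemma goA_reset (fn : String) (rest : List String) (i c : Int)
    (h : rest = [] ∨ ∃ x t, rest = x :: t ∧ PySem.Str.strip x ≠ "") :
    pvGoA fn rest i c = pvGoA fn rest i 0 := by
  rcases h with h | ⟨x, t, rfl, hx⟩
  · subst h; simp [pvGoA]
  · simp [pvGoA, hx]

lemma goA_eq_goB (fn : String) :
    ∀ (n : Nat) (lines : List String) (i : Int), lines.length ≤ n →
    pvGoA fn lines i 0 = pvGoB fn lines i := by
  intro n
  induction n with
  | zero =>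
    intro lines i h
    have : lines = [] := List.length_eq_zero_iff.mp (Nat.le_zero.mp h)
    simp [this, pvGoA, pvGoB]
  | succ n ih =>
    intro lines i h
    match lines with
    | [] => simp [pvGoA, pvGoB]
    | l :: rest =>
      by_cases hl : PySem.Str.strip l = ""
      · have hsplit : (l :: rest).takeWhile (fun s => PySem.Str.strip s == "")
            ++ (l :: rest).dropWhile (fun s => PySem.Str.strip s == "") = l :: rest :=
          List.takeWhile_append_dropWhile
        have hall : ∀ x ∈ (l :: rest).takeWhile (fun s => PySem.Str.strip s == ""),
            PySem.Str.strip x = "" := by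
          intro x hx
          simpa using List.mem_takeWhile_imp hx
        have hdrop : (l :: rest).dropWhile (fun s => PySem.Str.strip s == "")
            = rest.dropWhile (fun s => PySem.Str.strip s == "") := by
          rw [List.dropWhile_cons_of_pos (by simp [hl])]
        have hlenr : ((l :: rest).dropWhile (fun s => PySem.Str.strip s == "")).length ≤ n := by
          rw [hdrop]
          have := List.length_dropWhile_le (fun s => PySem.Str.strip s == "") rest
          simp only [List.length_cons] at h
          omega
        have hreset : (l :: rest).dropWhile (fun s => PySem.Str.strip s == "") = []
            ∨ ∃ x t, (l :: rest).dropWhile (fun s => PySem.Str.strip s == "") = x :: t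
                ∧ PySem.Str.strip x ≠ "" := by
          cases hr : (l :: rest).dropWhile (fun s => PySem.Str.strip s == "") with
          | nil => exact Or.inl rfl
          | cons x t =>
            refine Or.inr ⟨x, t, rfl, ?_⟩
            have := pvDropWhile_head_false _ _ _ _ hr
            simpa using this
        have hA := goA_run fn ((l :: rest).takeWhile (fun s => PySem.Str.strip s == ""))
          ((l :: rest).dropWhile (fun s => PySem.Str.strip s == "")) i 0 hall
        rw [hsplit] at hA
        rw [hA, goA_reset fn _ _ _ hreset, ih _ _ hlenr]
        rw [pvGoB]
        simp only [if_pos hl]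
        rw [if_congr (show ((0:Int) < 3 ∧ 3 ≤ 0
              + (((l :: rest).takeWhile (fun s => PySem.Str.strip s == "")).length : Int))
            ↔ 3 ≤ ((l :: rest).takeWhile (fun s => PySem.Str.strip s == "")).length by
              constructor
              · intro ⟨_, h2⟩; omega
              · intro h2; exact ⟨by omega, by omega⟩) rfl rfl]
        norm_num
      · have hB : pvGoB fn (l :: rest) i = pvGoB fn rest (i + 1) := by
          rw [pvGoB]; simp [hl]
        rw [hB, ← ih rest (i + 1) (by simp only [List.length_cons] at h; omega)]
        simp [pvGoA, hl]

-- ===== VERDICT (by name: the statement is the Claim_ definition above) =====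
theorem detect_consecutive_blank_lines_spec : Claim_equal_detect_consecutive_blank_lines := by
  intro source file_name _
  simp only [Spec_detect_consecutive_blank_lines, detect_consecutive_blank_lines,
    detect_consecutive_blank_lines_alt]
  rw [foldA_eq_goA]
  simp only [List.nil_append]
  exact goA_eq_goB file_name (pvLines source).length (pvLines source) 0 le_rfl
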